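-- pv_equiv track=rewrite | github.com/PeterChen0509/Data-Science-Projects | FinQA/code/retriever/finqa_utils.py | program_tokenization
-- ===== SOURCE A (Python) =====
-- def program_tokenization(original_program):
--     original_program = original_program.split(', ')
--     program = []
--     for tok in original_program:
--         cur_tok = ''
--         for c in tok:
--             if c == ')':
--                 if cur_tok != '':
--                     program.append(cur_tok)
--                     cur_tok = ''
--             cur_tok += c
--             if c in ['(', ')']:
--                 program.append(cur_tok)
--                 cur_tok = ''
--         if cur_tok != '':
--             program.append(cur_tok)
--     program.append('EOF')
--     return program
-- ===== SOURCE B (Python) =====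
-- def _tokens(s):
--     # span-based scanner: emit ')' alone, attach '(' to the run before it
--     if not s:
--         return []
--     c, rest = s[0], s[1:]
--     if c == ')':
--         return [')'] + _tokens(rest)
--     if c == '(':
--         return ['('] + _tokens(rest)
--     k = 1
--     while k < len(s) and s[k] not in '()':
--         k += 1
--     if k < len(s) and s[k] == '(':
--         return [s[:k + 1]] + _tokens(s[k + 1:])
--     return [s[:k]] + _tokens(s[k:])
--
-- def program_tokenization(original_program):
--     program = []
--     for piece in original_program.split(', '):
--         program += _tokens(piece)
--     program.append('EOF')
--     return program
-- ===== Notes on version B (the rewrite author's own statement) =====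
-- stated objective: alternative
-- what changed: A's per-character accumulate-and-flush cur_tok automaton is replaced by a recursive span scanner that emits whole tokens by slicing: a lone ')', or the longest non-paren run with a following '(' attached.
import Mathlib
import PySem

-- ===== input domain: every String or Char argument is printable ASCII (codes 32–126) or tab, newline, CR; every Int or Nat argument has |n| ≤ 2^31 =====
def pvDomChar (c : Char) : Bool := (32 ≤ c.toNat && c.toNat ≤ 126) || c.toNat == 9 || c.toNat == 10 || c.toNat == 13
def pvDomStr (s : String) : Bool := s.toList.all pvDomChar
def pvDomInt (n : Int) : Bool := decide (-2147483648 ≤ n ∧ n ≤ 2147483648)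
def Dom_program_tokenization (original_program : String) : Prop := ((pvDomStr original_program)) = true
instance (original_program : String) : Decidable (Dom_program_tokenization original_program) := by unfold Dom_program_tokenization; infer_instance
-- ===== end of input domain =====

-- B replaces A's per-character accumulate/flush automaton by a recursive span scanner
-- (emit ')' alone, attach '(' to the non-paren run before it); objective: alternative.

-- ===== PORT A =====
-- inner-loop body of A: state (program, cur_tok), one character c
def pvStepA (st : List String × List Char) (c : Char) : List String × List Char :=
  let (program, cur) := st
  -- if c == ')': if cur_tok != '': program.append(cur_tok); cur_tok = ''
  let (program, cur) := if c = ')' ∧ cur ≠ [] then (program ++ [String.mk cur], ([] : List Char)) else (program, cur)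
  -- cur_tok += c
  let cur := cur ++ [c]
  -- if c in ['(', ')']: program.append(cur_tok); cur_tok = ''
  if c = '(' ∨ c = ')' then (program ++ [String.mk cur], []) else (program, cur)

def program_tokenization (original_program : String) : List String :=
  let pieces := PySem.Chars.splitOn original_program.toList ", ".toList
  let program := pieces.foldl (fun program tok =>
    let (program, cur) := tok.foldl pvStepA (program, [])
    if cur ≠ [] then program ++ [String.mk cur] else program) []
  program ++ ["EOF"]

-- ===== PORT B =====
def pvNotParen (c : Char) : Bool := ¬ (c = '(' ∨ c = ')')

-- port of B's _tokens: recursive span scanner over the characters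
def pvTokB (s : List Char) : List String :=
  match s with
  | [] => []
  | c :: rest =>
    if c = ')' then ")" :: pvTokB rest
    else if c = '(' then "(" :: pvTokB rest
    else
      -- the while loop computes the longest non-paren run s[:k] (k ≥ 1): run = s[1:k], tail = s[k:]
      let run := rest.takeWhile pvNotParen
      let tail := rest.dropWhile pvNotParen
      if tail.head? = some '(' then String.mk (c :: run ++ ['(']) :: pvTokB tail.tail
      else String.mk (c :: run) :: pvTokB tail
termination_by s.length
decreasing_by
  · simp
  · simp
  · have h1 := rest.length_dropWhile_le pvNotParen
    have h2 := rest.dropWhile pvNotParen |>.length_tail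
    simp; omega
  · have h1 := rest.length_dropWhile_le pvNotParen
    simp; omega

def program_tokenization_alt (original_program : String) : List String :=
  let program := (PySem.Chars.splitOn original_program.toList ", ".toList).foldl
    (fun program piece => program ++ pvTokB piece) []
  program ++ ["EOF"]

-- ===== PRECONDITION & SPEC =====
def Spec_program_tokenization (original_program : String) (out : List String) : Prop := out = program_tokenization_alt original_program
instance (original_program : String) (out : List String) : Decidable (Spec_program_tokenization original_program out) := by unfold Spec_program_tokenization; infer_instance

-- ===== CLAIM (what is proved, stated in full; the proofs are below) =====
def Claim_equal_program_tokenization : Prop := ∀ (original_program : String), Dom_program_tokenization original_program → Spec_program_tokenization original_program (program_tokenization original_program)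

-- ===== LEMMAS AND PROOFS =====

theorem pvMkR : String.mk [')'] = ")" := rfl
theorem pvMkL : String.mk ['('] = "(" := rfl

-- direct recursive form of A's per-piece loop (cur is the pending cur_tok)
def pvRecA (cur : List Char) : List Char → List String
  | [] => if cur = [] then [] else [String.mk cur]
  | c :: cs =>
    if c = ')' then (if cur = [] then [] else [String.mk cur]) ++ [")"] ++ pvRecA [] cs
    else if c = '(' then String.mk (cur ++ [c]) :: pvRecA [] cs
    else pvRecA (cur ++ [c]) cs

theorem pvFoldA_eq (cs : List Char) : ∀ (program : List String) (cur : List Char),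
    (let (p, c) := cs.foldl pvStepA (program, cur)
     if c ≠ [] then p ++ [String.mk c] else p) = program ++ pvRecA cur cs := by
  induction cs with
  | nil =>
    intro program cur
    simp [pvRecA]
    by_cases h : cur = [] <;> simp [h]
  | cons c cs ih =>
    intro program cur
    simp only [List.foldl_cons]
    by_cases hr : c = ')'
    · subst hr
      by_cases hc : cur = []
      · simp [pvStepA, hc, pvRecA, ih, pvMkR]
      · simp [pvStepA, hc, pvRecA, ih, pvMkR]
    · by_cases hl : c = '('
      · subst hl
        simp [pvStepA, hr, pvRecA, ih]
      · simp [pvStepA, hr, hl, pvRecA, ih]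

theorem pvTakeWhile_all {l : List Char} (h : ∀ x ∈ l, pvNotParen x = true) :
    l.takeWhile pvNotParen = l := List.takeWhile_eq_self_iff.mpr h

theorem pvDropWhile_append {l t : List Char} (h : ∀ x ∈ l, pvNotParen x = true)
    (ht : pvNotParen (t.headD ')') = false ∨ t = []) :
    (l ++ t).dropWhile pvNotParen = t := by
  induction l with
  | nil =>
    cases t with
    | nil => simp
    | cons a t' =>
      rcases ht with ht | ht
      · simp at ht; simp [List.dropWhile, ht]
      · simp at ht
  | cons a l' ih =>
    have ha : pvNotParen a = true := h a (by simp)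
    simp only [List.cons_append, List.dropWhile, ha]
    exact ih (fun x hx => h x (by simp [hx]))

theorem pvTakeWhile_append {l t : List Char} (h : ∀ x ∈ l, pvNotParen x = true)
    (ht : pvNotParen (t.headD ')') = false ∨ t = []) :
    (l ++ t).takeWhile pvNotParen = l := by
  induction l with
  | nil =>
    cases t with
    | nil => simp
    | cons a t' =>
      rcases ht with ht | ht
      · simp at ht; simp [List.takeWhile, ht]
      · simp at ht
  | cons a l' ih =>
    have ha : pvNotParen a = true := h a (by simp)
    simp only [List.cons_append, List.takeWhile, ha]
    simp [ih (fun x hx => h x (by simp [hx]))]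

-- key lemma: A's accumulate/flush recursion with pending run `cur` is B's scanner on cur ++ cs
theorem pvRecA_eq_tokB (cs : List Char) : ∀ (cur : List Char),
    (∀ x ∈ cur, pvNotParen x = true) → pvRecA cur cs = pvTokB (cur ++ cs) := by
  induction cs with
  | nil =>
    intro cur h
    cases cur with
    | nil => simp [pvRecA, pvTokB]
    | cons d dr =>
      have hd := h d (by simp)
      have hd1 : ¬ d = ')' := by simp [pvNotParen] at hd; tauto
      have hd2 : ¬ d = '(' := by simp [pvNotParen] at hd; tauto
      rw [pvRecA, pvTokB.eq_def]
      have hdr : ∀ x ∈ dr, pvNotParen x = true := fun x hx => h x (by simp [hx])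
      have h1 : dr.takeWhile pvNotParen = dr := pvTakeWhile_all hdr
      have h2 : dr.dropWhile pvNotParen = [] := by
        have := pvDropWhile_append (l := dr) (t := []) hdr (Or.inr rfl)
        simpa using this
      simp [hd1, hd2, h1, h2, pvTokB]
  | cons c cs ih =>
    intro cur h
    by_cases hr : c = ')'
    · subst hr
      rw [pvRecA]
      simp only [if_pos rfl]
      cases cur with
      | nil => simp [pvTokB, pvMkR, pvMkL, ih [] (by simp)]
      | cons d dr =>
        have hd := h d (by simp)
        have hd1 : ¬ d = ')' := by simp [pvNotParen] at hd; tauto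
        have hd2 : ¬ d = '(' := by simp [pvNotParen] at hd; tauto
        have hdr : ∀ x ∈ dr, pvNotParen x = true := fun x hx => h x (by simp [hx])
        have h1 : (dr ++ ')' :: cs).takeWhile pvNotParen = dr :=
          pvTakeWhile_append hdr (Or.inl (by simp [pvNotParen]))
        have h2 : (dr ++ ')' :: cs).dropWhile pvNotParen = ')' :: cs :=
          pvDropWhile_append hdr (Or.inl (by simp [pvNotParen]))
        rw [show (d :: dr) ++ ')' :: cs = d :: (dr ++ ')' :: cs) by simp, pvTokB]
        simp [hd1, hd2, h1, h2, pvTokB, pvMkR, pvMkL, ih [] (by simp)]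
    · by_cases hl : c = '('
      · subst hl
        rw [pvRecA]
        simp only [if_neg (show ¬('(' : Char) = ')' by decide), if_pos rfl]
        cases cur with
        | nil => simp [pvTokB, pvMkR, pvMkL, ih [] (by simp)]
        | cons d dr =>
          have hd := h d (by simp)
          have hd1 : ¬ d = ')' := by simp [pvNotParen] at hd; tauto
          have hd2 : ¬ d = '(' := by simp [pvNotParen] at hd; tauto
          have hdr : ∀ x ∈ dr, pvNotParen x = true := fun x hx => h x (by simp [hx])
          have h1 : (dr ++ '(' :: cs).takeWhile pvNotParen = dr :=
            pvTakeWhile_append hdr (Or.inl (by simp [pvNotParen]))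
          have h2 : (dr ++ '(' :: cs).dropWhile pvNotParen = '(' :: cs :=
            pvDropWhile_append hdr (Or.inl (by simp [pvNotParen]))
          rw [show (d :: dr) ++ '(' :: cs = d :: (dr ++ '(' :: cs) by simp, pvTokB]
          simp [hd1, hd2, h1, h2, pvMkL, ih [] (by simp)]
      · rw [pvRecA]
        simp only [if_neg hr, if_neg hl]
        have hc : pvNotParen c = true := by simp [pvNotParen]; tauto
        have := ih (cur ++ [c]) (by
          intro x hx; simp at hx
          rcases hx with hx | hx
          · exact h x hx
          · subst hx; exact hc)
        rw [this]; simp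

theorem pvPiece_eq (tok : List Char) (program : List String) :
    (let (p, c) := tok.foldl pvStepA (program, ([] : List Char))
     if c ≠ [] then p ++ [String.mk c] else p) = program ++ pvTokB tok := by
  rw [pvFoldA_eq]
  rw [pvRecA_eq_tokB tok [] (by simp)]
  simp

-- ===== VERDICT (by name: the statement is the Claim_ definition above) =====
theorem program_tokenization_spec : Claim_equal_program_tokenization := by
  intro s _
  unfold Spec_program_tokenization program_tokenization program_tokenization_alt
  have key : ∀ (pieces : List (List Char)) (acc : List String),
      pieces.foldl (fun program tok =>
        let (program, cur) := tok.foldl pvStepA (program, [])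
        if cur ≠ [] then program ++ [String.mk cur] else program) acc
      = pieces.foldl (fun program piece => program ++ pvTokB piece) acc := by
    intro pieces
    induction pieces with
    | nil => intro acc; rfl
    | cons p ps ih =>
      intro acc
      simp only [List.foldl_cons]
      rw [← ih]
      have := pvPiece_eq p acc
      simp only at this
      rw [this]
  simp only [key]
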